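-- pv_equiv track=rewrite | github.com/carlomartinez8/el-capi-data | pipeline/reconcile/conflicts.py | _normalize_position
-- ===== SOURCE A (Python) =====
-- POSITION_BROAD_TO_SPECIFIC = {
--     "fwd": {"centre-forward", "right winger", "left winger", "second striker",
--             "attack", "forward", "striker", "fwd"},
--     "mid": {"central midfield", "defensive midfield", "attacking midfield",
--             "right midfield", "left midfield", "midfield", "mid"},
--     "def": {"centre-back", "left-back", "right-back", "defender", "def"},
--     "gk": {"goalkeeper", "gk"},
-- }
--
-- def _normalize_position(val) -> str | None:
--     """Normalize position to a broad category for comparison."""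
--     if val is None:
--         return None
--     s = str(val).strip().lower()
--     for broad, specifics in POSITION_BROAD_TO_SPECIFIC.items():
--         if s in specifics:
--             return broad
--     return s
-- ===== SOURCE B (Python) =====
-- # Alias -> broad category pairs, written out sorted by alias (lexicographic by
-- # code point) so the lookup can be done by binary search instead of scanning sets.
-- PAIRS = [
--     ("attack", "fwd"),
--     ("attacking midfield", "mid"),
--     ("central midfield", "mid"),
--     ("centre-back", "def"),
--     ("centre-forward", "fwd"),
--     ("def", "def"),
--     ("defender", "def"),
--     ("defensive midfield", "mid"),
--     ("forward", "fwd"),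
--     ("fwd", "fwd"),
--     ("gk", "gk"),
--     ("goalkeeper", "gk"),
--     ("left midfield", "mid"),
--     ("left winger", "fwd"),
--     ("left-back", "def"),
--     ("mid", "mid"),
--     ("midfield", "mid"),
--     ("right midfield", "mid"),
--     ("right winger", "fwd"),
--     ("right-back", "def"),
--     ("second striker", "fwd"),
--     ("striker", "fwd"),
-- ]
--
-- def _normalize_position(val) -> str | None:
--     """Normalize position to a broad category for comparison."""
--     if val is None:
--         return None
--     s = str(val).strip().lower()
--     lo, hi = 0, len(PAIRS)
--     while lo < hi:
--         mid = (lo + hi) // 2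
--         key, broad = PAIRS[mid]
--         if s < key:
--             hi = mid
--         elif key < s:
--             lo = mid + 1
--         else:
--             return broad
--     return s
-- ===== Notes on version B (the rewrite author's own statement) =====
-- stated objective: alternative
-- what changed: Replaces the per-call scan over the four category sets with binary search over a single sorted alias->broad list: an ordering-based bisection loop instead of set-membership tests.
import Mathlib
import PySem

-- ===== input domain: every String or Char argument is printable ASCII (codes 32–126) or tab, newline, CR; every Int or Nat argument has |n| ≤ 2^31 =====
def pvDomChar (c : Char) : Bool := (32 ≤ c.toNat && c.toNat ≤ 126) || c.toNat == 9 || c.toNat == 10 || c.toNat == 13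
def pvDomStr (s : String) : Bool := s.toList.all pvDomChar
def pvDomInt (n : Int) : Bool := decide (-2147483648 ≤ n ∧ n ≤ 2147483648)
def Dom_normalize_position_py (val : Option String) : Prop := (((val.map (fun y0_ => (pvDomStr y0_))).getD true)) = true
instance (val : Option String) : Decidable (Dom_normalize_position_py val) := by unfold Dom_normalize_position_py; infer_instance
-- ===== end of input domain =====

-- B replaces A's scan over the four category sets by binary search over one sorted
-- alias->broad list; the return value is identical (objective: alternative).

-- ===== PORT A =====
-- POSITION_BROAD_TO_SPECIFIC, in insertion order (only membership is consumed).
def pvTable : List (String × PySem.Set String) :=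
  [("fwd", PySem.Set.ofList ["centre-forward", "right winger", "left winger", "second striker",
                             "attack", "forward", "striker", "fwd"]),
   ("mid", PySem.Set.ofList ["central midfield", "defensive midfield", "attacking midfield",
                             "right midfield", "left midfield", "midfield", "mid"]),
   ("def", PySem.Set.ofList ["centre-back", "left-back", "right-back", "defender", "def"]),
   ("gk",  PySem.Set.ofList ["goalkeeper", "gk"])]

-- the 'for broad, specifics in …: if s in specifics: return broad' loop
def pvFindBroad (s : String) : List (String × PySem.Set String) → Option String
  | [] => none
  | (broad, specifics) :: rest =>
      if PySem.Set.contains specifics s then some broad else pvFindBroad s rest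

def normalize_position_py (val : Option String) : Option String :=
  match val with
  | none => none
  | some v =>
      let s := PySem.Str.lower (PySem.Str.strip v)
      match pvFindBroad s pvTable with
      | some broad => some broad
      | none => some s

-- ===== PORT B =====
-- PAIRS: the alias->broad pairs, sorted by alias (code-point lexicographic)
def pvPairs : List (String × String) :=
  [("attack", "fwd"), ("attacking midfield", "mid"), ("central midfield", "mid"),
   ("centre-back", "def"), ("centre-forward", "fwd"), ("def", "def"),
   ("defender", "def"), ("defensive midfield", "mid"), ("forward", "fwd"),
   ("fwd", "fwd"), ("gk", "gk"), ("goalkeeper", "gk"),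
   ("left midfield", "mid"), ("left winger", "fwd"), ("left-back", "def"),
   ("mid", "mid"), ("midfield", "mid"), ("right midfield", "mid"),
   ("right winger", "fwd"), ("right-back", "def"),
   ("second striker", "fwd"), ("striker", "fwd")]

-- the 'while lo < hi' binary-search loop (fuel bounds the iteration count; 32
-- iterations always suffice for 22 entries, so the fuel is never exhausted).
-- Python's 's < key' on strings is lexicographic by code point: ported exactly
-- as '<' on the char lists (Lean's String '<' instance is kernel-opaque).
def pvBSearch (s : String) : Nat → Nat → Nat → Option String
  | 0, _, _ => none
  | fuel + 1, lo, hi =>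
      if lo < hi then
        let mid := (lo + hi) / 2
        let p := pvPairs.getD mid ("", "")
        if s.toList < p.1.toList then pvBSearch s fuel lo mid
        else if p.1.toList < s.toList then pvBSearch s fuel (mid + 1) hi
        else some p.2
      else none

def normalize_position_py_alt (val : Option String) : Option String :=
  match val with
  | none => none
  | some v =>
      let s := PySem.Str.lower (PySem.Str.strip v)
      match pvBSearch s 32 0 pvPairs.length with
      | some broad => some broad
      | none => some s

-- ===== PRECONDITION & SPEC =====
def Spec_normalize_position_py (val : Option String) (out : Option String) : Prop := out = normalize_position_py_alt val
instance (val : Option String) (out : Option String) : Decidable (Spec_normalize_position_py val out) := by unfold Spec_normalize_position_py; infer_instance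

-- ===== CLAIM (what is proved, stated in full; the proofs are below) =====
def Claim_equal_normalize_position_py : Prop := ∀ (val : Option String), Dom_normalize_position_py val → Spec_normalize_position_py val (normalize_position_py val)

-- ===== LEMMAS AND PROOFS =====

-- lexicographic trichotomy on char lists, lifted to string equality
lemma pvStr_eq_of_not_lt {a b : String} (h1 : ¬ a.toList < b.toList) (h2 : ¬ b.toList < a.toList) : a = b :=
  String.toList_inj.mp (le_antisymm (not_lt.mp h2) (not_lt.mp h1))

-- if s equals no alias in pvPairs, the binary search comes up empty
lemma pvBSearch_none (s : String) (h : ∀ p ∈ pvPairs, s ≠ p.1) :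
    ∀ (fuel lo hi : Nat), hi ≤ pvPairs.length → pvBSearch s fuel lo hi = none := by
  intro fuel
  induction fuel with
  | zero => intro lo hi _; rfl
  | succ n ih =>
      intro lo hi hle
      simp only [pvBSearch]
      split_ifs with hlt hx hy
      · exact ih lo ((lo + hi) / 2) (by omega)
      · exact ih ((lo + hi) / 2 + 1) hi hle
      · exfalso
        have hm : (lo + hi) / 2 < pvPairs.length := by omega
        have hmem : pvPairs.getD ((lo + hi) / 2) ("", "") ∈ pvPairs := by
          rw [List.getD_eq_getElem _ _ hm]; exact List.getElem_mem hm
        exact absurd (pvStr_eq_of_not_lt hx hy) (h _ hmem)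
      · rfl

-- both lookups agree for every query string: by cases on the 22 known aliases
-- (concrete evaluation), else both return none
set_option maxHeartbeats 4000000 in
lemma pvLookup_eq (s : String) : pvFindBroad s pvTable = pvBSearch s 32 0 pvPairs.length := by
  by_cases h0 : s = "attack"; · subst h0; decide
  by_cases h1 : s = "attacking midfield"; · subst h1; decide
  by_cases h2 : s = "central midfield"; · subst h2; decide
  by_cases h3 : s = "centre-back"; · subst h3; decide
  by_cases h4 : s = "centre-forward"; · subst h4; decide
  by_cases h5 : s = "def"; · subst h5; decide
  by_cases h6 : s = "defender"; · subst h6; decide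
  by_cases h7 : s = "defensive midfield"; · subst h7; decide
  by_cases h8 : s = "forward"; · subst h8; decide
  by_cases h9 : s = "fwd"; · subst h9; decide
  by_cases h10 : s = "gk"; · subst h10; decide
  by_cases h11 : s = "goalkeeper"; · subst h11; decide
  by_cases h12 : s = "left midfield"; · subst h12; decide
  by_cases h13 : s = "left winger"; · subst h13; decide
  by_cases h14 : s = "left-back"; · subst h14; decide
  by_cases h15 : s = "mid"; · subst h15; decide
  by_cases h16 : s = "midfield"; · subst h16; decide
  by_cases h17 : s = "right midfield"; · subst h17; decide
  by_cases h18 : s = "right winger"; · subst h18; decide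
  by_cases h19 : s = "right-back"; · subst h19; decide
  by_cases h20 : s = "second striker"; · subst h20; decide
  by_cases h21 : s = "striker"; · subst h21; decide
  have hA : pvFindBroad s pvTable = none := by
    simp [pvFindBroad, pvTable, PySem.Set.contains, PySem.Set.ofList,
          h0, h1, h2, h3, h4, h5, h6, h7, h8, h9, h10, h11, h12, h13, h14, h15,
          h16, h17, h18, h19, h20, h21]
  have hB : pvBSearch s 32 0 pvPairs.length = none :=
    pvBSearch_none s (by intro p hp; fin_cases hp <;> simp_all) 32 0 pvPairs.length (le_refl _)
  rw [hA, hB]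

-- ===== VERDICT (by name: the statement is the Claim_ definition above) =====
theorem normalize_position_py_spec : Claim_equal_normalize_position_py := by
  intro val _
  unfold Spec_normalize_position_py normalize_position_py normalize_position_py_alt
  cases val with
  | none => rfl
  | some v => simp only [pvLookup_eq]
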